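-- pv_equiv track=rewrite | github.com/FredAlfabetAdmin/LM_group_13 | catkin_ws/src/learning_machines/src/learning_machines/test_lstm.py | point_and_move
-- ===== SOURCE A (Python) =====
-- def point_and_move(points, width, height, center):
--     points_right, points_left = 0, 0
--     for point in points:
--         # if eucl_fn(point, [640//2, 480//2]) < center: #If near center ignore the rest and continue forward
--         if point[0] >= (width//2-center//2) and point[0] <= (width//2+center//2): #If near center ignore the rest and continue forward
--             return True, None, None
--         if point[0] <= (width//2-center//2): #If on the left
--             points_left+=1
--         else:
--             points_right+=1
--     return False, points_left, points_right
-- ===== SOURCE B (Python) =====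
-- def point_and_move(points, width, height, center):
--     lo = width // 2 - center // 2
--     hi = width // 2 + center // 2
--     for point in points:
--         if lo <= point[0] <= hi:
--             return True, None, None
--     points_left = sum(1 for p in points if p[0] <= lo)
--     return False, points_left, len(points) - points_left
-- ===== Notes on version B (the rewrite author's own statement) =====
-- stated objective: alternative
-- what changed: A's single early-exit pass with two running counters is replaced by a detect pass (return True on the first point in the central band) followed, only when no point is central, by a boundary-free count pass: points_left counted with sum(...) and points_right derived as len(points) - points_left.
import Mathlib
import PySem

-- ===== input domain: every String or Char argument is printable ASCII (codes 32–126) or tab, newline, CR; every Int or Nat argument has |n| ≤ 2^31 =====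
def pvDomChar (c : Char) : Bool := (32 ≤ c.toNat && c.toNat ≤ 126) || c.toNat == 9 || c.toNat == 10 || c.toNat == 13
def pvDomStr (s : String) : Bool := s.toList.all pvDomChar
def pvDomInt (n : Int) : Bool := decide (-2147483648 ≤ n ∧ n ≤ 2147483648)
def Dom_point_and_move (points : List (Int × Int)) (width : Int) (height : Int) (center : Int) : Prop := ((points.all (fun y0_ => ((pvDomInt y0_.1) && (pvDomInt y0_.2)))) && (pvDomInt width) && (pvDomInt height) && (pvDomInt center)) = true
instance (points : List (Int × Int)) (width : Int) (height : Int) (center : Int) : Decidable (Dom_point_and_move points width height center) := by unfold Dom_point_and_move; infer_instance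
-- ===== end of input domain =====

-- B replaces A's single early-exit pass carrying two counters by a detect pass and,
-- only when no point is central, a separate count pass (alternative decomposition, same cost).

-- ===== PORT A =====
-- A's loop: early return on a central point, otherwise bump the left/right counter.
def pamLoopA (width center : Int) (pts : List (Int × Int)) (pl pr : Int) :
    Bool × Option Int × Option Int :=
  match pts with
  | [] => (false, some pl, some pr)
  | p :: rest =>
    if p.1 ≥ (PySem.Int.floordiv width 2 - PySem.Int.floordiv center 2) ∧
       p.1 ≤ (PySem.Int.floordiv width 2 + PySem.Int.floordiv center 2) then
      (true, none, none)
    else if p.1 ≤ (PySem.Int.floordiv width 2 - PySem.Int.floordiv center 2) then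
      pamLoopA width center rest (pl + 1) pr
    else
      pamLoopA width center rest pl (pr + 1)

def point_and_move (points : List (Int × Int)) (width : Int) (height : Int) (center : Int) : Bool × Option Int × Option Int :=
  pamLoopA width center points 0 0

-- ===== PORT B =====
def point_and_move_alt (points : List (Int × Int)) (width : Int) (height : Int) (center : Int) : Bool × Option Int × Option Int :=
  let lo := PySem.Int.floordiv width 2 - PySem.Int.floordiv center 2
  let hi := PySem.Int.floordiv width 2 + PySem.Int.floordiv center 2
  if points.any (fun p => lo ≤ p.1 && p.1 ≤ hi) then
    (true, none, none)
  else
    let pl : Int := ((points.filter (fun p => p.1 ≤ lo)).length : Int)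
    (false, some pl, some ((points.length : Int) - pl))

-- ===== PRECONDITION & SPEC =====
def Spec_point_and_move (points : List (Int × Int)) (width : Int) (height : Int) (center : Int) (out : Bool × Option Int × Option Int) : Prop := out = point_and_move_alt points width height center
instance (points : List (Int × Int)) (width : Int) (height : Int) (center : Int) (out : Bool × Option Int × Option Int) : Decidable (Spec_point_and_move points width height center out) := by unfold Spec_point_and_move; infer_instance

-- ===== CLAIM (what is proved, stated in full; the proofs are below) =====
def Claim_equal_point_and_move : Prop := ∀ (points : List (Int × Int)) (width : Int) (height : Int) (center : Int), Dom_point_and_move points width height center → Spec_point_and_move points width height center (point_and_move points width height center)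

-- ===== LEMMAS AND PROOFS =====
-- The loop of A, for arbitrary accumulators, equals B's two-pass result shifted by the accumulators.
theorem pamLoopA_eq (width center : Int) (pts : List (Int × Int)) (pl pr : Int) :
    pamLoopA width center pts pl pr =
      (if pts.any (fun p => (PySem.Int.floordiv width 2 - PySem.Int.floordiv center 2) ≤ p.1 &&
                            p.1 ≤ (PySem.Int.floordiv width 2 + PySem.Int.floordiv center 2)) then
         (true, none, none)
       else
         (false,
          some (pl + ((pts.filter (fun p => p.1 ≤ (PySem.Int.floordiv width 2 - PySem.Int.floordiv center 2))).length : Int)),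
          some (pr + ((pts.length : Int) - ((pts.filter (fun p => p.1 ≤ (PySem.Int.floordiv width 2 - PySem.Int.floordiv center 2))).length : Int))))) := by
  set lo : Int := PySem.Int.floordiv width 2 - PySem.Int.floordiv center 2 with hlo
  set hi : Int := PySem.Int.floordiv width 2 + PySem.Int.floordiv center 2 with hhi
  induction pts generalizing pl pr with
  | nil => simp [pamLoopA]
  | cons p rest ih =>
    rw [pamLoopA, ← hlo, ← hhi]
    by_cases hc : lo ≤ p.1 ∧ p.1 ≤ hi
    · rw [if_pos ⟨hc.1, hc.2⟩, List.any_cons,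
        if_pos (by simp [hc.1, hc.2])]
    · rw [if_neg hc, List.any_cons]
      have hcb : (decide (lo ≤ p.1) && decide (p.1 ≤ hi)) = false := by
        rcases Decidable.not_and_iff_not_or_not.mp hc with h | h <;> simp [h]
      rw [hcb, Bool.false_or]
      by_cases hl : p.1 ≤ lo
      · rw [if_pos hl, ih, List.filter_cons_of_pos (by simpa using hl)]
        split
        · rfl
        · simp only [List.length_cons, Prod.mk.injEq, Option.some.injEq]
          refine ⟨trivial, ?_, ?_⟩ <;> push_cast <;> ring
      · rw [if_neg hl, ih, List.filter_cons_of_neg (by simpa using hl)]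
        split
        · rfl
        · simp only [List.length_cons, Prod.mk.injEq, Option.some.injEq]
          refine ⟨trivial, trivial, ?_⟩
          push_cast; ring

-- ===== VERDICT (by name: the statement is the Claim_ definition above) =====
theorem point_and_move_spec : Claim_equal_point_and_move := by
  intro points width height center _
  unfold Spec_point_and_move point_and_move point_and_move_alt
  rw [pamLoopA_eq]
  simp only [zero_add]
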